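-- pv_equiv track=rewrite | github.com/vosslab/biology-problems | inheritance-problems/genemaplib.py | crossover_after_index
-- ===== SOURCE A (Python) =====
-- import copy
--
-- def flip_gene_by_letter(genotype: str, gene_letter: str, basetype: str) -> str:
-- 	"""
-- 	Flips a specified gene in the genotype.
--
-- 	Parameters
-- 	----------
-- 	genotype : str
-- 		The original genotype.
-- 	gene : str
-- 		The gene to flip.
-- 	basetype : str
-- 		The basic type used as a reference for flipping the gene.
--
-- 	Returns
-- 	-------
-- 	str
-- 		The new genotype after the gene has been flipped.
-- 	"""
-- 	# Convert genotype string to a list for easier manipulation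
-- 	newlist = list(genotype)
--
-- 	# Iterate through the genotype to find and flip the specified gene
-- 	for i in range(len(genotype)):
-- 		if basetype[i] == gene_letter:
-- 			if genotype[i] == '+':
-- 				newlist[i] = basetype[i]
-- 			else:
-- 				newlist[i] = '+'
--
-- 	# Join the list back into a string to form the new genotype
-- 	newtype = ''.join(newlist)
--
-- 	# Return the new genotype
-- 	return newtype
--
-- def crossover_after_index(genotype: str, gene_index: str, gene_order: str) -> str:
-- 	"""
-- 	Flips a specified gene in the genotype.
--
-- 	parent genotypes: ++++, abcd
-- 	index 1: +bcd, a+++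
-- 	index 2: ++cd, ab++
-- 	index 3: +++d, abc+
--
-- 	Parameters
-- 	----------
-- 	genotype : str
-- 		The original genotype.
-- 	gene : str
-- 		The gene to flip.
-- 	gene_order : str
-- 		The basic type used as a reference for flipping the gene.
-- 	"""
-- 	sorted_genes = ''.join(sorted(list(gene_order)))
--
-- 	new_genotype = copy.copy(genotype)
-- 	# Iterate through the genotype to find and flip the specified gene
-- 	for i in range(len(genotype)):
-- 		if i >= gene_index:
-- 			gene_letter = gene_order[i]
-- 			new_genotype = flip_gene_by_letter(new_genotype, gene_letter, sorted_genes)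
-- 	# Return the new genotype
-- 	return new_genotype
-- ===== SOURCE B (Python) =====
-- def crossover_after_index(genotype: str, gene_index: str, gene_order: str) -> str:
-- 	# One pass: count how often each letter occurs in gene_order[start:len(genotype)],
-- 	# then toggle each position once according to the parity of its letter's count.
-- 	n = len(genotype)
-- 	start = max(gene_index, 0)
-- 	if start >= n:
-- 		return genotype
-- 	sorted_genes = sorted(gene_order)
-- 	counts = {}
-- 	for ch in gene_order[start:n]:
-- 		counts[ch] = counts.get(ch, 0) + 1
-- 	out = []
-- 	for j in range(n):
-- 		k = counts.get(sorted_genes[j], 0)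
-- 		if k == 0:
-- 			out.append(genotype[j])
-- 		elif (genotype[j] == '+') == (k % 2 == 1):
-- 			out.append(sorted_genes[j])
-- 		else:
-- 			out.append('+')
-- 	return ''.join(out)
-- ===== Notes on version B (the rewrite author's own statement) =====
-- stated objective: faster
-- what changed: A calls flip_gene_by_letter (a full scan of the genotype) once per gene index at or after gene_index; B counts each letter's occurrences in gene_order[start:n] once with a dict and then builds the result in a single pass, toggling each position by the parity of its letter's count.
import Mathlib
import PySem

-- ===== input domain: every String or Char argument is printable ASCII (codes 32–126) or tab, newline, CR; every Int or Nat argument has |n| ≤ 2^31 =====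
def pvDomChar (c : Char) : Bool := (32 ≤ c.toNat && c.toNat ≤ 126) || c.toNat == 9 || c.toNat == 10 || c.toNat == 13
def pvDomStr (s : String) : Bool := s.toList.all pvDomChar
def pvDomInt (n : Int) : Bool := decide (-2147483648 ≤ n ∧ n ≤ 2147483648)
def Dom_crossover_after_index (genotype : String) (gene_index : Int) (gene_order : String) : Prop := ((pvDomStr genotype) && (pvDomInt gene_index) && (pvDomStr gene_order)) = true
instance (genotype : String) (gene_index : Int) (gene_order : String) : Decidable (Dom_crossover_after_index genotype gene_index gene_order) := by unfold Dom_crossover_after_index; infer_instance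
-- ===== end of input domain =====

-- B replaces A's flip-pass-per-gene quadratic loop nest by one letter-count pass plus a single parity-toggle pass (objective: faster).

-- ===== PORT A =====
-- flip_gene_by_letter: for each i, if basetype[i] == gene_letter, toggle newlist[i]
def pvFlipGene (genotype : List Char) (gene_letter : Char) (basetype : List Char) : List Char :=
  (List.range genotype.length).foldl (fun (newlist : List Char) (i : Nat) =>
    if PySem.List.pyGetD basetype (i : Int) ' ' == gene_letter then
      if PySem.List.pyGetD genotype (i : Int) ' ' == '+' then
        newlist.set i (PySem.List.pyGetD basetype (i : Int) ' ')
      else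
        newlist.set i '+'
    else newlist) genotype

def crossover_after_index (genotype : String) (gene_index : Int) (gene_order : String) : String :=
  let sorted_genes := PySem.List.sorted gene_order.toList (fun x => x) false
  let new_genotype := (List.range genotype.toList.length).foldl (fun (cur : List Char) (i : Nat) =>
    if gene_index ≤ (i : Int) then
      pvFlipGene cur (PySem.List.pyGetD gene_order.toList (i : Int) ' ') sorted_genes
    else cur) genotype.toList
  String.ofList new_genotype

-- ===== PORT B =====
def crossover_after_index_alt (genotype : String) (gene_index : Int) (gene_order : String) : String :=
  let g := genotype.toList
  let n := g.length
  let start := max gene_index 0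
  if (n : Int) ≤ start then genotype
  else
    let sorted_genes := PySem.List.sorted gene_order.toList (fun x => x) false
    -- counts[ch] = counts.get(ch, 0) + 1 over gene_order[start:n]
    let counts := (PySem.List.slice gene_order.toList (some start) (some (n : Int))).foldl
        (fun (d : PySem.Dict Char Int) ch => d.insert ch (d.getD ch 0 + 1)) PySem.Dict.empty
    let out := (List.range n).foldl (fun (out : List Char) (j : Nat) =>
      let s := PySem.List.pyGetD sorted_genes (j : Int) ' '
      let k : Int := counts.getD s 0
      let c := PySem.List.pyGetD g (j : Int) ' '
      out ++ [if k = 0 then c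
              else if ((c == '+') = (PySem.Int.mod k 2 == 1)) then s else '+']) ([] : List Char)
    String.ofList out

-- ===== PRECONDITION & SPEC =====
-- Pre_ excludes exactly the inputs on which A raises IndexError: at least one flip happens
-- (gene_index < len(genotype)) while gene_order is shorter than genotype.
def Pre_crossover_after_index (genotype : String) (gene_index : Int) (gene_order : String) : Prop :=
  genotype.toList.length ≤ gene_order.toList.length ∨ (genotype.toList.length : Int) ≤ gene_index
instance (genotype : String) (gene_index : Int) (gene_order : String) : Decidable (Pre_crossover_after_index genotype gene_index gene_order) := by unfold Pre_crossover_after_index; infer_instance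

def pvWitness_crossover_after_index : String × Int × String := ("+b+d", 2, "badc")

def Spec_crossover_after_index (genotype : String) (gene_index : Int) (gene_order : String) (out : String) : Prop := out = crossover_after_index_alt genotype gene_index gene_order
instance (genotype : String) (gene_index : Int) (gene_order : String) (out : String) : Decidable (Spec_crossover_after_index genotype gene_index gene_order out) := by unfold Spec_crossover_after_index; infer_instance

-- ===== CLAIM (what is proved, stated in full; the proofs are below) =====
def Claim_equal_crossover_after_index : Prop := ∀ (genotype : String) (gene_index : Int) (gene_order : String), Dom_crossover_after_index genotype gene_index gene_order → Pre_crossover_after_index genotype gene_index gene_order → Spec_crossover_after_index genotype gene_index gene_order (crossover_after_index genotype gene_index gene_order)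

-- ===== LEMMAS AND PROOFS =====

-- the character at a position after its letter has been flipped k times
-- (c = the original character, s = the sorted-genes character at that position)
def pvTog (c s : Char) (k : Nat) : Char :=
  if k = 0 then c else if ((c == '+') = decide (k % 2 = 1)) then s else '+'

-- one more flip advances the toggle state
theorem pvTog_step (c s : Char) (k : Nat) :
    (if pvTog c s k == '+' then s else '+') = pvTog c s (k + 1) := by
  rcases k with _ | k
  · by_cases hc : c = '+' <;> simp [pvTog, hc]
  · simp only [pvTog, Nat.succ_ne_zero, if_false]
    have hpar : ((k + 1 + 1) % 2 = 1) ↔ ¬ ((k + 1) % 2 = 1) := by omega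
    by_cases hp : (k + 1) % 2 = 1 <;> by_cases hc : c = '+' <;> by_cases hs : s = '+' <;>
      simp [hp, hc, hs, hpar]

-- a fold that conditionally writes position i at step i, read off pointwise
theorem pvFoldSet_length {α : Type} (cond : Nat → Bool) (v : Nat → α) (m : Nat) (acc : List α) :
    ((List.range m).foldl (fun l i => if cond i then l.set i (v i) else l) acc).length = acc.length := by
  induction m with
  | zero => simp
  | succ m ih =>
    rw [List.range_succ, List.foldl_append, List.foldl_cons, List.foldl_nil]
    split_ifs <;> simp [ih]

theorem pvFoldSet_getElem? {α : Type} (cond : Nat → Bool) (v : Nat → α) (m : Nat) (acc : List α) (j : Nat) :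
    ((List.range m).foldl (fun l i => if cond i then l.set i (v i) else l) acc)[j]? =
      if j < m ∧ cond j = true ∧ j < acc.length then some (v j) else acc[j]? := by
  induction m with
  | zero => simp
  | succ m ih =>
    rw [List.range_succ, List.foldl_append, List.foldl_cons, List.foldl_nil]
    have hlen := pvFoldSet_length cond v m acc
    by_cases hcm : cond m = true
    · rw [if_pos hcm, List.getElem?_set]
      by_cases hjm : m = j
      · subst hjm
        rw [if_pos rfl, hlen]
        by_cases hjr : m < acc.length
        · rw [if_pos hjr, if_pos ⟨by omega, hcm, hjr⟩]
        · rw [if_neg hjr, if_neg (by tauto), List.getElem?_eq_none (by omega)]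
      · rw [if_neg hjm, ih]
        by_cases h1 : j < m ∧ cond j = true ∧ j < acc.length
        · rw [if_pos h1, if_pos ⟨by omega, h1.2⟩]
        · rw [if_neg h1, if_neg (fun h2 => h1 ⟨by omega, h2.2⟩)]
    · rw [if_neg hcm, ih]
      by_cases hjm : j = m
      · subst hjm
        rw [if_neg (by tauto), if_neg (by tauto)]
      · by_cases h1 : j < m ∧ cond j = true ∧ j < acc.length
        · rw [if_pos h1, if_pos ⟨by omega, h1.2⟩]
        · rw [if_neg h1, if_neg (fun h2 => h1 ⟨by omega, h2.2⟩)]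

theorem pvFlipGene_eq (cur : List Char) (letter : Char) (base : List Char) :
    pvFlipGene cur letter base =
      (List.range cur.length).foldl
        (fun (l : List Char) (i : Nat) => if (PySem.List.pyGetD base (i : Int) ' ' == letter) then
            l.set i (if PySem.List.pyGetD cur (i : Int) ' ' == '+'
                     then PySem.List.pyGetD base (i : Int) ' ' else '+')
          else l) cur := by
  unfold pvFlipGene
  apply PySem.List.foldl_congr_mem
  intro acc x _
  split_ifs <;> rfl

theorem pvFlipGene_getElem? (cur : List Char) (letter : Char) (base : List Char) (j : Nat) :
    (pvFlipGene cur letter base)[j]? =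
      if j < cur.length ∧ (PySem.List.pyGetD base (j : Int) ' ' == letter) = true then
        some (if PySem.List.pyGetD cur (j : Int) ' ' == '+'
              then PySem.List.pyGetD base (j : Int) ' ' else '+')
      else cur[j]? := by
  rw [pvFlipGene_eq, pvFoldSet_getElem?]
  by_cases h1 : j < cur.length <;> simp [h1]

theorem pvDropTake (l : List Char) (a m : Nat) (h : a + m ≤ l.length) :
    (l.drop a).take m = (List.range' a m).map (fun (i : Nat) => PySem.List.pyGetD l (i : Int) ' ') := by
  apply List.ext_getElem
  · simp; omega
  · intro t h1 h2
    simp only [List.length_map, List.length_range'] at h2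
    simp only [List.getElem_take, List.getElem_drop, List.getElem_map, List.getElem_range']
    rw [PySem.List.pyGetD_eq_getElem _ _ (by omega) (by push_cast; omega)]
    congr 1
    omega

theorem pvMapRangeId (g : List Char) :
    (List.range g.length).map (fun (j : Nat) => PySem.List.pyGetD g (j : Int) ' ') = g := by
  apply List.ext_getElem
  · simp
  · intro t h1 h2
    simp only [List.getElem_map, List.getElem_range]
    rw [PySem.List.pyGetD_eq_getElem _ _ (by omega) (by exact_mod_cast h2)]
    simp

-- A's outer loop: after the first m steps, position j has been flipped once per earlier
-- in-range index i whose gene letter equals sorted_genes[j]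
theorem pvOuter (g go s : List Char) (gi : Int) (m : Nat) (hm : m ≤ g.length) :
    (List.range m).foldl (fun (cur : List Char) (i : Nat) =>
        if gi ≤ (i : Int) then pvFlipGene cur (PySem.List.pyGetD go (i : Int) ' ') s else cur) g
    = (List.range g.length).map (fun (j : Nat) =>
        pvTog (PySem.List.pyGetD g (j : Int) ' ') (PySem.List.pyGetD s (j : Int) ' ')
          ((List.range m).countP (fun (i : Nat) =>
            decide (gi ≤ (i : Int)) && (PySem.List.pyGetD go (i : Int) ' ' == PySem.List.pyGetD s (j : Int) ' ')))) := by
  induction m with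
  | zero =>
    simp only [List.range_zero, List.foldl_nil, List.countP_nil]
    conv_rhs => rw [show (fun (j : Nat) =>
        pvTog (PySem.List.pyGetD g (j : Int) ' ') (PySem.List.pyGetD s (j : Int) ' ') 0)
      = (fun (j : Nat) => PySem.List.pyGetD g (j : Int) ' ') from by funext j; simp [pvTog]]
    rw [pvMapRangeId]
  | succ m ih =>
    have hm' : m ≤ g.length := by omega
    rw [List.range_succ, List.foldl_append, List.foldl_cons, List.foldl_nil, ih hm']
    set M := (List.range g.length).map (fun (j : Nat) =>
        pvTog (PySem.List.pyGetD g (j : Int) ' ') (PySem.List.pyGetD s (j : Int) ' ')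
          ((List.range m).countP (fun (i : Nat) =>
            decide (gi ≤ (i : Int)) && (PySem.List.pyGetD go (i : Int) ' ' == PySem.List.pyGetD s (j : Int) ' ')))) with hM
    have hMlen : M.length = g.length := by simp [hM]
    have hcnt : ∀ (j : Nat), (List.range m ++ [m]).countP (fun (i : Nat) =>
            decide (gi ≤ (i : Int)) && (PySem.List.pyGetD go (i : Int) ' ' == PySem.List.pyGetD s (j : Int) ' '))
        = (List.range m).countP (fun (i : Nat) =>
            decide (gi ≤ (i : Int)) && (PySem.List.pyGetD go (i : Int) ' ' == PySem.List.pyGetD s (j : Int) ' '))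
          + (if (decide (gi ≤ (m : Int)) && (PySem.List.pyGetD go (m : Int) ' ' == PySem.List.pyGetD s (j : Int) ' ')) then 1 else 0) := by
      intro j
      rw [List.countP_append]
      simp [List.countP_cons]
    by_cases hgi : gi ≤ (m : Int)
    · rw [if_pos hgi]
      apply List.ext_getElem?
      intro j
      rw [pvFlipGene_getElem?]
      by_cases hj : j < g.length
      · have hjM : j < M.length := by rw [hMlen]; exact hj
        have hR : ((List.range g.length).map (fun (j : Nat) =>
            pvTog (PySem.List.pyGetD g (j : Int) ' ') (PySem.List.pyGetD s (j : Int) ' ')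
              ((List.range m ++ [m]).countP (fun (i : Nat) =>
                decide (gi ≤ (i : Int)) && (PySem.List.pyGetD go (i : Int) ' ' == PySem.List.pyGetD s (j : Int) ' ')))))[j]?
            = some (pvTog (PySem.List.pyGetD g (j : Int) ' ') (PySem.List.pyGetD s (j : Int) ' ')
              ((List.range m ++ [m]).countP (fun (i : Nat) =>
                decide (gi ≤ (i : Int)) && (PySem.List.pyGetD go (i : Int) ' ' == PySem.List.pyGetD s (j : Int) ' ')))) := by
          simp [hj]
        have hMj : M[j]? = some (pvTog (PySem.List.pyGetD g (j : Int) ' ') (PySem.List.pyGetD s (j : Int) ' ')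
            ((List.range m).countP (fun (i : Nat) =>
              decide (gi ≤ (i : Int)) && (PySem.List.pyGetD go (i : Int) ' ' == PySem.List.pyGetD s (j : Int) ' ')))) := by
          rw [hM]; simp [hj]
        have hMval : PySem.List.pyGetD M (j : Int) ' ' = pvTog (PySem.List.pyGetD g (j : Int) ' ') (PySem.List.pyGetD s (j : Int) ' ')
            ((List.range m).countP (fun (i : Nat) =>
              decide (gi ≤ (i : Int)) && (PySem.List.pyGetD go (i : Int) ' ' == PySem.List.pyGetD s (j : Int) ' '))) := by
          rw [PySem.List.pyGetD_eq_getElem _ _ (by omega) (by rw [hMlen]; exact_mod_cast hj)]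
          simp only [Int.toNat_natCast]
          have h2 := hMj
          rw [List.getElem?_eq_getElem hjM, Option.some_inj] at h2
          exact h2
        rw [hR]
        by_cases hc : (PySem.List.pyGetD s (j : Int) ' ' == PySem.List.pyGetD go (m : Int) ' ') = true
        · rw [if_pos ⟨hjM, hc⟩, hMval, hcnt j]
          have hpred : (decide (gi ≤ (m : Int)) && (PySem.List.pyGetD go (m : Int) ' ' == PySem.List.pyGetD s (j : Int) ' ')) = true := by
            simp only [Bool.and_eq_true, decide_eq_true_eq]
            exact ⟨hgi, by rwa [BEq.comm] at hc⟩
          rw [hpred]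
          simp only [if_true]
          exact congrArg some (pvTog_step _ _ _)
        · rw [if_neg (fun h => hc h.2), hMj, hcnt j]
          have hgo : (PySem.List.pyGetD go (m : Int) ' ' == PySem.List.pyGetD s (j : Int) ' ') = false := by
            rw [BEq.comm]
            exact Bool.eq_false_iff.mpr hc
          rw [hgo]
          simp
      · have hjM : ¬ j < M.length := by rw [hMlen]; exact hj
        rw [if_neg (fun h => hjM h.1)]
        rw [List.getElem?_eq_none (by omega : M.length ≤ j)]
        rw [List.getElem?_eq_none (by simpa using by omega : ((List.range g.length).map _).length ≤ j)]
    · rw [if_neg hgi]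
      rw [hM]
      apply List.map_congr_left
      intro j hjmem
      rw [hcnt j]
      have hpred : (decide (gi ≤ (m : Int)) && (PySem.List.pyGetD go (m : Int) ' ' == PySem.List.pyGetD s (j : Int) ' ')) = false := by
        simp [hgi]
      rw [hpred]
      simp

-- B's counting dict, read off: getD = occurrence count
theorem pvCountsGetD (xs : List Char) (c : Char) :
    (xs.foldl (fun (d : PySem.Dict Char Int) ch => d.insert ch (d.getD ch 0 + 1)) PySem.Dict.empty).getD c 0
      = (xs.count c : Int) := by
  have h : (xs.foldl (fun (d : PySem.Dict Char Int) ch => d.insert ch (d.getD ch 0 + 1)) PySem.Dict.empty)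
      = PySem.Dict.counter xs := by
    rw [PySem.Dict.counter_eq_foldl]
    apply PySem.List.foldl_congr_mem
    intro d x _
    rfl
  rw [h, PySem.Dict.getD_counter]

-- count of a letter in gene_order[start:n] = number of in-range flip indices carrying it
theorem pvCount (go : List Char) (gi : Int) (n a : Nat) (hn : n ≤ go.length)
    (hA : (a : Int) = max gi 0) (ha : a ≤ n) (c : Char) :
    (PySem.List.slice go (some (max gi 0)) (some (n : Int))).count c
      = (List.range n).countP (fun (i : Nat) =>
          decide (gi ≤ (i : Int)) && (PySem.List.pyGetD go (i : Int) ' ' == c)) := by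
  rw [← hA]
  rw [PySem.List.slice_toNat _ (Int.natCast_nonneg a) (Int.natCast_nonneg n)]
  rw [Int.toNat_natCast, Int.toNat_natCast]
  have hfit : a + (n - a) ≤ go.length := le_trans (by omega) hn
  rw [pvDropTake go a (n - a) hfit]
  rw [List.count_eq_countP, List.countP_map]
  have hsplit : List.range n = List.range' 0 a ++ List.range' a (n - a) := by
    have h := @List.range'_append 0 a (n - a) 1
    simp only [Nat.one_mul, Nat.zero_add] at h
    have hn' : n = a + (n - a) := by omega
    rw [hn']
    rw [List.range_eq_range', ← h]
    congr 2
    omega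
  rw [hsplit, List.countP_append]
  have h1 : (List.range' 0 a).countP (fun (i : Nat) =>
      decide (gi ≤ (i : Int)) && (PySem.List.pyGetD go (i : Int) ' ' == c)) = 0 := by
    rw [List.countP_eq_zero]
    intro i hi
    have h3 : i < a := by simpa using (List.mem_range'_1.mp hi).2
    have h4 : ¬ gi ≤ (i : Int) := by omega
    simp [h4]
  have h2 : (List.range' a (n - a)).countP (fun (i : Nat) =>
      decide (gi ≤ (i : Int)) && (PySem.List.pyGetD go (i : Int) ' ' == c))
      = (List.range' a (n - a)).countP ((fun x => x == c) ∘ (fun (i : Nat) => PySem.List.pyGetD go (i : Int) ' ')) := by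
    apply List.countP_congr
    intro i hi
    have hia : a ≤ i := (List.mem_range'_1.mp hi).1
    have hgi : gi ≤ (i : Int) := by omega
    simp [hgi]
  rw [h1, h2]
  omega

-- the parity test on the Int counter equals the parity test on the Nat count
theorem pvModBeq (cnt : Nat) :
    (PySem.Int.mod ((cnt : Nat) : Int) 2 == 1) = decide (cnt % 2 = 1) := by
  rw [PySem.Int.mod_eq_emod_of_pos (by norm_num : (0:Int) < 2)]
  rcases Nat.mod_two_eq_zero_or_one cnt with h | h
  · have h2 : ((cnt : Int)) % 2 = 0 := by omega
    simp [h2, h]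
  · have h2 : ((cnt : Int)) % 2 = 1 := by omega
    simp [h2, h]

-- ===== VERDICT (by name: the statement is the Claim_ definition above) =====
theorem crossover_after_index_spec : Claim_equal_crossover_after_index := by
  unfold Claim_equal_crossover_after_index
  intro genotype gene_index gene_order _ hpre
  unfold Spec_crossover_after_index
  unfold crossover_after_index crossover_after_index_alt
  simp only []
  rw [pvOuter genotype.toList gene_order.toList
      (PySem.List.sorted gene_order.toList (fun x => x) false) gene_index
      genotype.toList.length (le_refl _)]
  by_cases hstart : ((genotype.toList.length : Nat) : Int) ≤ max gene_index 0
  · rw [if_pos hstart]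
    have hz : ∀ j ∈ List.range genotype.toList.length,
        pvTog (PySem.List.pyGetD genotype.toList (j : Int) ' ')
          (PySem.List.pyGetD (PySem.List.sorted gene_order.toList (fun x => x) false) (j : Int) ' ')
          ((List.range genotype.toList.length).countP (fun (i : Nat) =>
            decide (gene_index ≤ (i : Int)) && (PySem.List.pyGetD gene_order.toList (i : Int) ' ' ==
              PySem.List.pyGetD (PySem.List.sorted gene_order.toList (fun x => x) false) (j : Int) ' ')))
        = PySem.List.pyGetD genotype.toList (j : Int) ' ' := by
      intro j hj
      have hcnt0 : (List.range genotype.toList.length).countP (fun (i : Nat) =>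
            decide (gene_index ≤ (i : Int)) && (PySem.List.pyGetD gene_order.toList (i : Int) ' ' ==
              PySem.List.pyGetD (PySem.List.sorted gene_order.toList (fun x => x) false) (j : Int) ' ')) = 0 := by
        rw [List.countP_eq_zero]
        intro i hi
        have hilt : i < genotype.toList.length := List.mem_range.mp hi
        have : ¬ gene_index ≤ (i : Int) := by omega
        simp [this]
      rw [hcnt0]
      simp [pvTog]
    rw [List.map_congr_left hz, pvMapRangeId, String.ofList_toList]
  · rw [if_neg hstart]
    rw [PySem.List.foldl_append_singleton_eq_map, List.nil_append]
    have hlt : max gene_index 0 < (genotype.toList.length : Int) := by omega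
    have hn : genotype.toList.length ≤ gene_order.toList.length := by
      rcases hpre with h | h
      · exact h
      · omega
    congr 1
    apply List.map_congr_left
    intro j hj
    have hjn : j < genotype.toList.length := List.mem_range.mp hj
    rw [pvCountsGetD]
    rw [pvCount gene_order.toList gene_index genotype.toList.length (max gene_index 0).toNat hn
        (Int.toNat_of_nonneg (le_max_right _ _)) (by omega)
        (PySem.List.pyGetD (PySem.List.sorted gene_order.toList (fun x => x) false) (j : Int) ' ')]
    set cnt := (List.range genotype.toList.length).countP (fun (i : Nat) =>
        decide (gene_index ≤ (i : Int)) && (PySem.List.pyGetD gene_order.toList (i : Int) ' ' ==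
          PySem.List.pyGetD (PySem.List.sorted gene_order.toList (fun x => x) false) (j : Int) ' ')) with hcnt
    by_cases hc0 : cnt = 0
    · simp [pvTog, hc0]
    · have hic0 : ¬ ((cnt : Int) = 0) := by exact_mod_cast hc0
      rw [pvTog, if_neg hc0, if_neg hic0, pvModBeq]
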